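-- pv_equiv track=rewrite | github.com/dosdos/Google-CodeJam | 2020/qualification_round/B_nesting_depth/B.py | solve
-- ===== SOURCE A (Python) =====
-- def solve(case, s):
--     result = '(' * int(s[0])
--     for i in range(len(s)-1):
--         result += s[i]
--         diff = int(s[i]) - int(s[i+1])
--         if diff > 0:
--             result += ')' * diff
--         elif diff < 0:
--             result += '(' * (-1 * diff)
--     result += s[-1] + ')' * int(s[-1])
--     return "Case #{}: {}".format(case, result)
-- ===== SOURCE B (Python) =====
-- def solve(case, s):
--     # Wrap every digit d fully as '('*d + d + ')'*d, then repeatedly cancel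
--     # adjacent ')(' pairs until none remain.
--     out = ''.join('(' * int(c) + c + ')' * int(c) for c in s)
--     while ')(' in out:
--         out = out.replace(')(', '')
--     return "Case #{}: {}".format(case, out)
-- ===== Notes on version B (the rewrite author's own statement) =====
-- stated objective: alternative
-- what changed: B fully parenthesizes every digit d as '('*d+d+')'*d and then repeatedly cancels adjacent ')(' pairs with str.replace until a fixed point, instead of A's single pass emitting the signed depth difference between neighbouring digits.
import Mathlib
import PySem

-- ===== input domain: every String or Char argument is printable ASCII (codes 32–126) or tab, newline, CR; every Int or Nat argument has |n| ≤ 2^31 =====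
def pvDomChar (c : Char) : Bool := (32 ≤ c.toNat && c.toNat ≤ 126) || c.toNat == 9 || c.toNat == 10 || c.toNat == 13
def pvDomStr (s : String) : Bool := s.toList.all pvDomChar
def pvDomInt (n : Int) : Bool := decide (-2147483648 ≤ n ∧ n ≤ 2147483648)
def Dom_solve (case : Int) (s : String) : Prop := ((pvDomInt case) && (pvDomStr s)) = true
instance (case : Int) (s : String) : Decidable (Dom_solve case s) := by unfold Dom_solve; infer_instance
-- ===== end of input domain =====

-- B wraps every digit d fully as '('*d + d + ')'*d and then repeatedly cancels adjacent
-- ')(' pairs to a fixed point, instead of A's pass over adjacent digit differences.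

-- int(c) for a single digit char; exact on digit chars, which Pre_solve guarantees
def pvDigit (c : Char) : Int := (c.toNat : Int) - 48

-- ===== PORT A =====
-- the body of A's 'for i in range(len(s)-1)' loop
def pvAStep (l : List Char) (res : List Char) (i : Nat) : List Char :=
  let c := l.getD i ' '
  let res := res ++ [c]
  let diff := pvDigit c - pvDigit (l.getD (i + 1) ' ')
  if diff > 0 then res ++ List.replicate diff.toNat ')'
  else if diff < 0 then res ++ List.replicate ((-1) * diff).toNat '('
  else res

def solve (case : Int) (s : String) : String :=
  let l := s.toList
  let result := List.replicate (pvDigit (l.getD 0 ' ')).toNat '('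
  let result := (List.range (l.length - 1)).foldl (pvAStep l) result
  let result := result ++ [l.getLastD ' '] ++ List.replicate (pvDigit (l.getLastD ' ')).toNat ')'
  String.mk ("Case #".toList ++ (PySem.Int.toStr case).toList ++ ": ".toList ++ result)

-- ===== PORT B =====
-- ''.join('('*int(c) + c + ')'*int(c) for c in s)
def pvWrap (l : List Char) : List Char :=
  l.flatMap (fun c => List.replicate (pvDigit c).toNat '(' ++ [c] ++ List.replicate (pvDigit c).toNat ')')

-- out.replace(')(', ''): one left-to-right non-overlapping pass
def pvRepl : List Char → List Char
  | [] => []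
  | [c] => [c]
  | a :: b :: t => if a = ')' ∧ b = '(' then pvRepl t else a :: pvRepl (b :: t)

-- ')(' in out
def pvHasPat : List Char → Bool
  | a :: b :: t => (a = ')' && b = '(') || pvHasPat (b :: t)
  | _ => false

-- B's 'while ')(' in out' loop; the fuel is only a totality guard (each pass that finds
-- the pattern shortens the string, so wrap-length + 1 passes always reach the fixed point)
def pvCancelF : Nat → List Char → List Char
  | 0, l => l
  | fuel + 1, l => if pvHasPat l then pvCancelF fuel (pvRepl l) else l

def solve_alt (case : Int) (s : String) : String :=
  let w := pvWrap s.toList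
  let out := pvCancelF (w.length + 1) w
  String.mk ("Case #".toList ++ (PySem.Int.toStr case).toList ++ ": ".toList ++ out)

-- ===== PRECONDITION & SPEC =====
-- exactly the inputs on which Python A returns: a nonempty all-digit string
-- (int(...) raises ValueError on any non-digit, s[0] raises IndexError on the empty string)
def Pre_solve (case : Int) (s : String) : Prop :=
  s.toList ≠ [] ∧ s.toList.all (fun c => 48 ≤ c.toNat && c.toNat ≤ 57) = true
instance (case : Int) (s : String) : Decidable (Pre_solve case s) := by unfold Pre_solve; infer_instance
def pvWitness_solve : Int × String := (1, "021")

def Spec_solve (case : Int) (s : String) (out : String) : Prop := out = solve_alt case s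
instance (case : Int) (s : String) (out : String) : Decidable (Spec_solve case s out) := by unfold Spec_solve; infer_instance

-- ===== CLAIM (what is proved, stated in full; the proofs are below) =====
def Claim_equal_solve : Prop := ∀ (case : Int) (s : String), Dom_solve case s → Pre_solve case s → Spec_solve case s (solve case s)

-- ===== LEMMAS AND PROOFS =====

-- the bracket run emitted between nesting levels p and d
def pvBr (p d : Int) : List Char :=
  if d > p then List.replicate (d - p).toNat '(' else List.replicate (p - d).toNat ')'

-- the canonical body between the leading brackets and the trailing close run
def pvBody (p : Int) : List Char → List Char
  | [] => []
  | c :: t => pvBr p (pvDigit c) ++ [c] ++ pvBody (pvDigit c) t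

def pvDepth (p : Int) : List Char → Int
  | [] => p
  | c :: t => pvDepth (pvDigit c) t

-- what A's index loop appends, stated pairwise on the list
def pvAloop : List Char → List Char
  | a :: b :: t => [a] ++ pvBr (pvDigit a) (pvDigit b) ++ pvAloop (b :: t)
  | _ => []

lemma pvAStep_eq (l : List Char) (res : List Char) (i : Nat) :
    pvAStep l res i =
      res ++ [l.getD i ' '] ++ pvBr (pvDigit (l.getD i ' ')) (pvDigit (l.getD (i + 1) ' ')) := by
  simp only [pvAStep, pvBr]
  set p := pvDigit (l.getD i ' ')
  set d := pvDigit (l.getD (i + 1) ' ')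
  rcases lt_trichotomy p d with h | h | h
  · rw [if_neg (by omega), if_pos (by omega), if_pos (by omega)]
    simp [List.append_assoc]
  · rw [if_neg (by omega), if_neg (by omega), if_neg (by omega)]
    simp [h]
  · rw [if_pos (by omega), if_neg (by omega)]

lemma pvAfold (l : List Char) : ∀ acc : List Char,
    (List.range (l.length - 1)).foldl (pvAStep l) acc = acc ++ pvAloop l := by
  induction l with
  | nil => simp [pvAloop]
  | cons a t ih =>
    cases t with
    | nil => intro acc; simp [pvAloop]
    | cons b t' =>
      intro acc
      have hlen : (a :: b :: t').length - 1 = ((b :: t').length - 1) + 1 := by simp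
      rw [hlen, List.range_succ_eq_map, List.foldl_cons, List.foldl_map]
      have hstep : ∀ (r : List Char) (i : Nat), pvAStep (a :: b :: t') r (i + 1) = pvAStep (b :: t') r i := by
        intro r i; simp [pvAStep, List.getD]
      calc (List.range ((b :: t').length - 1)).foldl
            (fun r i => pvAStep (a :: b :: t') r (i + 1)) (pvAStep (a :: b :: t') acc 0)
          = (List.range ((b :: t').length - 1)).foldl (pvAStep (b :: t')) (pvAStep (a :: b :: t') acc 0) := by
            exact PySem.List.foldl_congr_mem _ _ _ _ (fun r i _ => hstep r i)
        _ = pvAStep (a :: b :: t') acc 0 ++ pvAloop (b :: t') := ih _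
        _ = acc ++ pvAloop (a :: b :: t') := by
            rw [pvAStep_eq]
            simp [pvAloop, List.getD, List.append_assoc]

lemma pvL (t : List Char) : ∀ a : Char,
    pvAloop (a :: t) ++ [(a :: t).getLastD ' '] = [a] ++ pvBody (pvDigit a) t := by
  induction t with
  | nil => intro a; simp [pvAloop, pvBody]
  | cons b t' ih =>
    intro a
    have : (a :: b :: t').getLastD ' ' = (b :: t').getLastD ' ' := by simp [List.getLastD]
    simp only [pvAloop, this, List.append_assoc, List.cons_append, List.nil_append]
    congr 1
    rw [ih b]
    simp [pvBody, List.append_assoc]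

lemma pvM (t : List Char) : ∀ (p : Int) (a : Char),
    pvDepth p (a :: t) = pvDigit ((a :: t).getLastD ' ') := by
  induction t with
  | nil => intro p a; simp [pvDepth]
  | cons b t' ih =>
    intro p a
    have : (a :: b :: t').getLastD ' ' = (b :: t').getLastD ' ' := by simp [List.getLastD]
    rw [this]
    show pvDepth (pvDigit a) (b :: t') = _
    exact ih (pvDigit a) b

lemma pvInit (d : Int) (h : 0 ≤ d) : List.replicate d.toNat '(' = pvBr 0 d := by
  simp only [pvBr]
  rcases lt_or_eq_of_le h with h' | h'
  · rw [if_pos (by omega)]; simp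
  · rw [if_neg (by omega)]; simp [← h']

-- ---------- B side: segments ----------

def pvDigN (c : Char) : Nat := (pvDigit c).toNat

def pvSegs (p : Nat) : List Char → List (Nat × Nat × Char)
  | [] => []
  | c :: t => (p, pvDigN c, c) :: pvSegs (pvDigN c) t

def pvDepthN (p : Nat) : List Char → Nat
  | [] => p
  | c :: t => pvDepthN (pvDigN c) t

def pvDecode : List (Nat × Nat × Char) → Nat → List Char
  | [], t => List.replicate t ')'
  | (a, b, c) :: r, t => List.replicate a ')' ++ List.replicate b '(' ++ [c] ++ pvDecode r t

def pvActive (s : Nat × Nat × Char) : Bool := 1 ≤ s.1 && 1 ≤ s.2.1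
def pvStep (s : Nat × Nat × Char) : Nat × Nat × Char :=
  if pvActive s then (s.1 - 1, s.2.1 - 1, s.2.2) else s
def pvNorm (s : Nat × Nat × Char) : Nat × Nat × Char :=
  (s.1 - min s.1 s.2.1, s.2.1 - min s.1 s.2.1, s.2.2)
def pvMu (segs : List (Nat × Nat × Char)) : Nat := (segs.map (fun s => min s.1 s.2.1)).sum

-- ---------- pvRepl / pvHasPat on runs ----------

lemma repl_cons_ne (c : Char) (xs : List Char) (hc : c ≠ ')') :
    pvRepl (c :: xs) = c :: pvRepl xs := by
  cases xs with
  | nil => simp [pvRepl]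
  | cons b t => simp only [pvRepl]; rw [if_neg (by tauto)]

lemma repl_cons_rp (ys : List Char) (h : ys.head? ≠ some '(') :
    pvRepl (')' :: ys) = ')' :: pvRepl ys := by
  cases ys with
  | nil => simp [pvRepl]
  | cons b t =>
    simp only [List.head?] at h
    simp only [pvRepl]
    rw [if_neg (by intro hh; exact h (by rw [hh.2]))]

lemma repl_open_run (b : Nat) (xs : List Char) :
    pvRepl (List.replicate b '(' ++ xs) = List.replicate b '(' ++ pvRepl xs := by
  induction b with
  | zero => simp
  | succ n ih =>
    rw [List.replicate_succ, List.cons_append, repl_cons_ne _ _ (by decide), ih]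
    simp

lemma repl_close_run_pass (a : Nat) (c : Char) (xs : List Char) (hc : c ≠ '(') :
    pvRepl (List.replicate a ')' ++ c :: xs) = List.replicate a ')' ++ pvRepl (c :: xs) := by
  induction a with
  | zero => simp
  | succ n ih =>
    rw [List.replicate_succ, List.cons_append, repl_cons_rp, ih]
    · simp
    · cases n with
      | zero => simpa using hc
      | succ m => simp [List.replicate_succ]

lemma repl_close_end (t : Nat) : pvRepl (List.replicate t ')') = List.replicate t ')' := by
  induction t with
  | zero => simp [pvRepl]
  | succ n ih =>
    rw [List.replicate_succ, repl_cons_rp, ih]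
    cases n with
    | zero => simp
    | succ m => simp [List.replicate_succ]

lemma repl_close_open (a : Nat) (xs : List Char) :
    pvRepl (List.replicate (a + 1) ')' ++ '(' :: xs) = List.replicate a ')' ++ pvRepl xs := by
  induction a with
  | zero => simp [pvRepl]
  | succ n ih =>
    rw [List.replicate_succ, List.cons_append, repl_cons_rp, ih]
    · simp [List.replicate_succ]
    · simp [List.replicate_succ]

lemma pat_cons_ne (c : Char) (xs : List Char) (hc : c ≠ ')') :
    pvHasPat (c :: xs) = pvHasPat xs := by
  cases xs with
  | nil => simp [pvHasPat]
  | cons b t => simp [pvHasPat, hc]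

lemma pat_cons_rp (ys : List Char) (h : ys.head? ≠ some '(') :
    pvHasPat (')' :: ys) = pvHasPat ys := by
  cases ys with
  | nil => simp [pvHasPat]
  | cons b t =>
    simp only [List.head?] at h
    have : b ≠ '(' := by intro hh; exact h (by rw [hh])
    simp [pvHasPat, this]

lemma pat_open_run (b : Nat) (xs : List Char) :
    pvHasPat (List.replicate b '(' ++ xs) = pvHasPat xs := by
  induction b with
  | zero => simp
  | succ n ih => rw [List.replicate_succ, List.cons_append, pat_cons_ne _ _ (by decide), ih]

lemma pat_close_run_pass (a : Nat) (c : Char) (xs : List Char) (hc : c ≠ '(') :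
    pvHasPat (List.replicate a ')' ++ c :: xs) = pvHasPat (c :: xs) := by
  induction a with
  | zero => simp
  | succ n ih =>
    rw [List.replicate_succ, List.cons_append, pat_cons_rp, ih]
    cases n with
    | zero => simpa using hc
    | succ m => simp [List.replicate_succ]

lemma pat_close_end (t : Nat) : pvHasPat (List.replicate t ')') = false := by
  induction t with
  | zero => simp [pvHasPat]
  | succ n ih =>
    rw [List.replicate_succ, pat_cons_rp, ih]
    cases n with
    | zero => simp
    | succ m => simp [List.replicate_succ]

lemma pat_close_open (a : Nat) (xs : List Char) :
    pvHasPat (List.replicate (a + 1) ')' ++ '(' :: xs) = true := by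
  induction a with
  | zero => simp [pvHasPat]
  | succ n ih =>
    rw [List.replicate_succ, List.cons_append, pat_cons_rp, ih]
    simp [List.replicate_succ]

-- ---------- segment-level behaviour ----------

def pvSegOK (s : Nat × Nat × Char) : Prop := s.2.2 ≠ '(' ∧ s.2.2 ≠ ')'

lemma repl_decode (segs : List (Nat × Nat × Char)) (t : Nat)
    (h : ∀ s ∈ segs, pvSegOK s) :
    pvRepl (pvDecode segs t) = pvDecode (segs.map pvStep) t := by
  induction segs with
  | nil => simpa [pvDecode] using repl_close_end t
  | cons hd r ih =>
    obtain ⟨a, b, c⟩ := hd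
    obtain ⟨hc1, hc2⟩ := h _ (List.mem_cons_self ..)
    have ihr := ih (fun s hs => h s (List.mem_cons_of_mem _ hs))
    cases b with
    | zero =>
      have hstep : pvStep (a, 0, c) = (a, 0, c) := by simp [pvStep, pvActive]
      simp only [pvDecode, List.map_cons, hstep, List.replicate_zero, List.nil_append,
        List.append_nil, List.cons_append, List.singleton_append, List.append_assoc]
      rw [repl_close_run_pass _ _ _ hc1, repl_cons_ne _ _ hc2, ihr]
    | succ b' =>
      cases a with
      | zero =>
        have hstep : pvStep (0, b' + 1, c) = (0, b' + 1, c) := by simp [pvStep, pvActive]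
        simp only [pvDecode, List.map_cons, hstep, List.replicate_zero, List.nil_append,
          List.append_nil, List.cons_append, List.singleton_append, List.append_assoc]
        rw [repl_open_run, repl_cons_ne _ _ hc2, ihr]
      | succ a' =>
        have hstep : pvStep (a' + 1, b' + 1, c) = (a', b', c) := by simp [pvStep, pvActive]
        simp only [pvDecode, List.map_cons, hstep, List.replicate_succ (n := b'),
          List.nil_append, List.append_nil, List.cons_append, List.singleton_append,
          List.append_assoc]
        rw [repl_close_open, repl_open_run, repl_cons_ne _ _ hc2, ihr]

lemma pat_decode (segs : List (Nat × Nat × Char)) (t : Nat)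
    (h : ∀ s ∈ segs, pvSegOK s) :
    pvHasPat (pvDecode segs t) = segs.any pvActive := by
  induction segs with
  | nil => simpa [pvDecode] using pat_close_end t
  | cons hd r ih =>
    obtain ⟨a, b, c⟩ := hd
    obtain ⟨hc1, hc2⟩ := h _ (List.mem_cons_self ..)
    have ihr := ih (fun s hs => h s (List.mem_cons_of_mem _ hs))
    cases b with
    | zero =>
      simp only [pvDecode, List.replicate_zero, List.nil_append, List.append_nil,
        List.cons_append, List.singleton_append, List.append_assoc]
      rw [pat_close_run_pass _ _ _ hc1, pat_cons_ne _ _ hc2, ihr]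
      simp [pvActive]
    | succ b' =>
      cases a with
      | zero =>
        simp only [pvDecode, List.replicate_zero, List.nil_append, List.append_nil,
          List.cons_append, List.singleton_append, List.append_assoc]
        rw [pat_open_run, pat_cons_ne _ _ hc2, ihr]
        simp [pvActive]
      | succ a' =>
        simp only [pvDecode, List.replicate_succ (n := b'), List.nil_append, List.append_nil,
          List.cons_append, List.singleton_append, List.append_assoc]
        rw [pat_close_open]
        simp [pvActive]

lemma norm_step (s : Nat × Nat × Char) : pvNorm (pvStep s) = pvNorm s := by
  obtain ⟨a, b, c⟩ := s
  simp only [pvStep, pvActive]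
  split
  · next h =>
    simp only [Bool.and_eq_true, decide_eq_true_eq] at h
    simp only [pvNorm, Prod.mk.injEq, and_true]
    refine ⟨by omega, by omega⟩
  · rfl

lemma step_segok (s : Nat × Nat × Char) (h : pvSegOK s) : pvSegOK (pvStep s) := by
  obtain ⟨a, b, c⟩ := s
  simp only [pvStep]
  split <;> simpa [pvSegOK] using h

lemma mu_step_le (segs : List (Nat × Nat × Char)) : pvMu (segs.map pvStep) ≤ pvMu segs := by
  induction segs with
  | nil => simp [pvMu]
  | cons hd r ih =>
    obtain ⟨a, b, c⟩ := hd
    simp only [pvMu, List.map_cons, List.sum_cons] at ih ⊢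
    have : min (pvStep (a, b, c)).1 (pvStep (a, b, c)).2.1 ≤ min a b := by
      simp only [pvStep, pvActive]; split <;> simp <;> omega
    omega

lemma mu_step_lt (segs : List (Nat × Nat × Char)) (h : segs.any pvActive = true) :
    pvMu (segs.map pvStep) < pvMu segs := by
  induction segs with
  | nil => simp at h
  | cons hd r ih =>
    obtain ⟨a, b, c⟩ := hd
    simp only [List.any_cons, Bool.or_eq_true] at h
    simp only [pvMu, List.map_cons, List.sum_cons]
    rcases h with h | h
    · have ha : 1 ≤ a ∧ 1 ≤ b := by simpa [pvActive] using h
      have h1 : min (pvStep (a, b, c)).1 (pvStep (a, b, c)).2.1 < min a b := by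
        simp only [pvStep, pvActive]
        rw [if_pos (by simp; omega)]
        simp; omega
      have h2 := mu_step_le r
      simp only [pvMu] at h2
      omega
    · have h1 : min (pvStep (a, b, c)).1 (pvStep (a, b, c)).2.1 ≤ min a b := by
        simp only [pvStep, pvActive]; split <;> simp <;> omega
      have h2 := ih h
      simp only [pvMu] at h2
      omega

lemma noactive_norm (segs : List (Nat × Nat × Char)) (h : segs.any pvActive = false) :
    segs.map pvNorm = segs := by
  induction segs with
  | nil => simp
  | cons hd r ih =>
    obtain ⟨a, b, c⟩ := hd
    simp only [List.any_cons, Bool.or_eq_false_iff] at h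
    have ha : ¬ (1 ≤ a ∧ 1 ≤ b) := by
      intro hh; have := h.1; simp [pvActive] at this; omega
    have hm : min a b = 0 := by omega
    have hid : pvNorm (a, b, c) = (a, b, c) := by simp [pvNorm, hm]
    rw [List.map_cons, ih h.2, hid]

lemma mu_zero_noactive (segs : List (Nat × Nat × Char)) (h : pvMu segs = 0) :
    segs.any pvActive = false := by
  induction segs with
  | nil => simp
  | cons hd r ih =>
    obtain ⟨a, b, c⟩ := hd
    simp only [pvMu, List.map_cons, List.sum_cons] at h
    simp only [List.any_cons, Bool.or_eq_false_iff]
    constructor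
    · simp [pvActive]; omega
    · exact ih (by simp [pvMu]; omega)

lemma cancel_decode (fuel : Nat) : ∀ (segs : List (Nat × Nat × Char)) (t : Nat),
    pvMu segs ≤ fuel → (∀ s ∈ segs, pvSegOK s) →
    pvCancelF fuel (pvDecode segs t) = pvDecode (segs.map pvNorm) t := by
  induction fuel with
  | zero =>
    intro segs t hmu hok
    have h0 : segs.any pvActive = false := mu_zero_noactive segs (by omega)
    simp [pvCancelF, noactive_norm segs h0]
  | succ n ih =>
    intro segs t hmu hok
    simp only [pvCancelF]
    rw [pat_decode segs t hok]
    by_cases hany : segs.any pvActive = true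
    · rw [if_pos hany, repl_decode segs t hok,
        ih (segs.map pvStep) t (by have := mu_step_lt segs hany; omega)
          (fun s hs => by
            obtain ⟨u, hu, rfl⟩ := List.mem_map.mp hs
            exact step_segok u (hok u hu))]
      rw [List.map_map]
      exact congrFun (congrArg _ (List.map_congr_left (fun s _ => norm_step s))) t
    · rw [if_neg (by simpa using hany), noactive_norm segs (by simpa using hany)]

-- ---------- decode / wrap / body correspondences ----------

lemma decode_segs_wrap (l : List Char) : ∀ p : Nat,
    pvDecode (pvSegs p l) (pvDepthN p l) = List.replicate p ')' ++ pvWrap l := by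
  induction l with
  | nil => intro p; simp [pvSegs, pvDepthN, pvDecode, pvWrap]
  | cons c t ih =>
    intro p
    simp only [pvSegs, pvDepthN, pvDecode, pvWrap, List.flatMap_cons]
    rw [ih (pvDigN c)]
    simp only [pvDigN, pvWrap]
    simp [List.append_assoc]

lemma dig_facts (c : Char) (h : 48 ≤ c.toNat ∧ c.toNat ≤ 57) :
    c ≠ '(' ∧ c ≠ ')' ∧ pvDigit c = ((pvDigN c : Nat) : Int) := by
  refine ⟨?_, ?_, ?_⟩
  · intro he; rw [he] at h; exact absurd h (by decide)
  · intro he; rw [he] at h; exact absurd h (by decide)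
  · simp only [pvDigN, pvDigit]
    omega

lemma br_nat (p d : Nat) :
    pvBr (p : Int) (d : Int) =
      List.replicate (p - min p d) ')' ++ List.replicate (d - min p d) '(' := by
  simp only [pvBr]
  split
  · next h =>
    have hpd : p < d := by exact_mod_cast h
    have h1 : ((d : Int) - p).toNat = d - p := by omega
    have h2 : p - min p d = 0 := by omega
    have h3 : min p d = p := by omega
    rw [h1, h2, h3]
    simp
  · next h =>
    have hpd : d ≤ p := by omega
    have h1 : ((p : Int) - d).toNat = p - d := by omega
    have h2 : d - min p d = 0 := by omega
    have h3 : min p d = d := by omega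
    rw [h1, h2, h3]
    simp

lemma decode_norm_body (l : List Char) (hd : ∀ c ∈ l, 48 ≤ c.toNat ∧ c.toNat ≤ 57) :
    ∀ p : Nat, pvDecode ((pvSegs p l).map pvNorm) (pvDepthN p l) =
      pvBody (p : Int) l ++ List.replicate (pvDepthN p l) ')' := by
  induction l with
  | nil => intro p; simp [pvSegs, pvDepthN, pvDecode, pvBody]
  | cons c t ih =>
    intro p
    obtain ⟨_, _, hcast⟩ := dig_facts c (hd c (List.mem_cons_self ..))
    simp only [pvSegs, pvDepthN, List.map_cons, pvDecode, pvNorm, pvBody]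
    rw [ih (fun x hx => hd x (List.mem_cons_of_mem _ hx)) (pvDigN c), hcast, br_nat]
    simp [List.append_assoc]

lemma depth_cast (l : List Char) (hd : ∀ c ∈ l, 48 ≤ c.toNat ∧ c.toNat ≤ 57) :
    ∀ p : Nat, pvDepth (p : Int) l = ((pvDepthN p l : Nat) : Int) := by
  induction l with
  | nil => intro p; simp [pvDepth, pvDepthN]
  | cons c t ih =>
    intro p
    obtain ⟨_, _, hcast⟩ := dig_facts c (hd c (List.mem_cons_self ..))
    simp only [pvDepth, pvDepthN]
    rw [hcast]
    exact ih (fun x hx => hd x (List.mem_cons_of_mem _ hx)) (pvDigN c)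

lemma segs_chars (l : List Char) : ∀ p s, s ∈ pvSegs p l → s.2.2 ∈ l := by
  induction l with
  | nil => intro p s hs; simp [pvSegs] at hs
  | cons c t ih =>
    intro p s hs
    simp only [pvSegs, List.mem_cons] at hs
    rcases hs with rfl | hs
    · simp
    · exact List.mem_cons_of_mem _ (ih (pvDigN c) s hs)

lemma mu_wrap (l : List Char) : ∀ p : Nat, pvMu (pvSegs p l) ≤ (pvWrap l).length := by
  induction l with
  | nil => intro p; simp [pvSegs, pvMu, pvWrap]
  | cons c t ih =>
    intro p
    have := ih (pvDigN c)
    simp only [pvSegs, pvMu, List.map_cons, List.sum_cons, pvWrap, List.flatMap_cons,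
      List.length_append, List.length_replicate, List.length_cons] at this ⊢
    simp only [pvDigN] at this ⊢
    omega

-- ===== VERDICT (by name: the statement is the Claim_ definition above) =====
theorem solve_spec : Claim_equal_solve := by
  intro case s _ hpre
  obtain ⟨hne, hdigall⟩ := hpre
  have hdig : ∀ c ∈ s.toList, 48 ≤ c.toNat ∧ c.toNat ≤ 57 := by
    intro c hc
    have := List.all_eq_true.mp hdigall c hc
    simpa using this
  simp only [Spec_solve, solve, solve_alt]
  obtain ⟨c, t, hl⟩ := List.exists_cons_of_ne_nil hne
  have h0 : 0 ≤ pvDigit c := by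
    have := hdig c (by rw [hl]; exact List.mem_cons_self ..)
    simp only [pvDigit]; omega
  congr 2
  -- B's body equals the canonical body
  have hB : pvCancelF ((pvWrap s.toList).length + 1) (pvWrap s.toList) =
      pvBody 0 s.toList ++ List.replicate (pvDepthN 0 s.toList) ')' := by
    have hw := decode_segs_wrap s.toList 0
    simp only [List.replicate_zero, List.nil_append] at hw
    rw [← hw]
    rw [cancel_decode _ _ _ (by have := mu_wrap s.toList 0; rw [hw]; omega)
      (fun sg hsg => by
        have hm := segs_chars s.toList 0 sg hsg
        obtain ⟨h1, h2, _⟩ := dig_facts sg.2.2 (hdig _ hm)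
        exact ⟨h1, h2⟩)]
    have := decode_norm_body s.toList hdig 0
    simpa using this
  rw [hB]
  -- A's body equals the canonical body
  rw [hl, pvAfold]
  have hget0 : (c :: t).getD 0 ' ' = c := rfl
  rw [hget0, pvInit _ h0]
  have hLc := pvL t c
  have hm := pvM t 0 c
  have hdepth : pvDepth 0 (c :: t) = ((pvDepthN 0 (c :: t) : Nat) : Int) := by
    have := depth_cast (c :: t) (by rw [← hl]; exact hdig) 0
    simpa using this
  have hlastN : (pvDigit ((c :: t).getLastD ' ')).toNat = pvDepthN 0 (c :: t) := by
    have h1 : pvDigit ((c :: t).getLastD ' ') = pvDepth 0 (c :: t) := hm.symm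
    rw [h1, hdepth]; simp
  calc pvBr 0 (pvDigit c) ++ pvAloop (c :: t) ++ [(c :: t).getLastD ' '] ++ List.replicate (pvDigit ((c :: t).getLastD ' ')).toNat ')'
      = pvBr 0 (pvDigit c) ++ (pvAloop (c :: t) ++ [(c :: t).getLastD ' ']) ++ List.replicate (pvDigit ((c :: t).getLastD ' ')).toNat ')' := by
        simp [List.append_assoc]
    _ = pvBr 0 (pvDigit c) ++ ([c] ++ pvBody (pvDigit c) t) ++ List.replicate (pvDepthN 0 (c :: t)) ')' := by
        rw [hLc, hlastN]
    _ = pvBody 0 (c :: t) ++ List.replicate (pvDepthN 0 (c :: t)) ')' := by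
        simp [pvBody, List.append_assoc]
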